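-- pv_equiv track=rewrite | github.com/haiyen040602/dess-repro | Codebase/convert_cameracoque_simple.py | find_token_indices
-- ===== SOURCE A (Python) =====
-- def find_token_indices(tokens, target_text):
--     """Find token indices for a given text"""
--     target_tokens = target_text.lower().split()
--
--     for i in range(len(tokens) - len(target_tokens) + 1):
--         tokens_lower = [t.lower() for t in tokens[i:i+len(target_tokens)]]
--         if tokens_lower == target_tokens:
--             return list(range(i, i + len(target_tokens)))
--
--     # Fallback: find first token that matches
--     for i, token in enumerate(tokens):
--         if target_text.lower() in token.lower() or token.lower() in target_text.lower():
--             return [i]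
--
--     return []
-- ===== SOURCE B (Python) =====
-- def find_token_indices(tokens, target_text):
--     """Find token indices for a given text"""
--     low = target_text.lower()
--     target = low.split()
--     toks = [t.lower() for t in tokens]
--     m = len(target)
--     n = len(toks)
--     if m == 0:
--         return []
--     # Positional index: lowered token -> ascending list of positions.  A window
--     # can only match where target[0] occurs, so only those starts are verified.
--     index = {}
--     for i, t in enumerate(toks):
--         index.setdefault(t, []).append(i)
--     for i in index.get(target[0], []):
--         if i + m <= n and toks[i:i+m] == target:
--             return list(range(i, i + m))
--     # Fallback: first token related to the target by containment
--     hit = next((k for k, tok in enumerate(toks) if low in tok or tok in low), None)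
--     return [] if hit is None else [hit]
-- ===== Notes on version B (the rewrite author's own statement) =====
-- stated objective: faster
-- what changed: B builds a positional index (dict lowered-token -> ascending positions) in one pass and verifies windows only at positions of the first target token, so A's scan over every start position (which re-lowercases a fresh m-token slice each time) disappears; the fallback is a single next() over a generator; lowercasing is done once up front.
import Mathlib
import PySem

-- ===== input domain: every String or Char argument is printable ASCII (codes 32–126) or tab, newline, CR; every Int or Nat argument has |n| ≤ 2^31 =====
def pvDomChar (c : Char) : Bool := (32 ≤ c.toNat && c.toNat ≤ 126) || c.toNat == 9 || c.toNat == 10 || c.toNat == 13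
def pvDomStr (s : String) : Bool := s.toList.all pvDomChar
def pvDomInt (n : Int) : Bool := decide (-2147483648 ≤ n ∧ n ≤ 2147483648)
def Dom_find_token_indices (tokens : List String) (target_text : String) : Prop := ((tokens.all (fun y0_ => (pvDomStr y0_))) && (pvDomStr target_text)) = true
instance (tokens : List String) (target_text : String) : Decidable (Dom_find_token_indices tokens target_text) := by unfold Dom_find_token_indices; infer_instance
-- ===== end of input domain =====

-- B replaces A's scan over every start position by a one-pass positional index
-- (lowered token -> ascending positions) and verifies windows only at the
-- positions of the first target token (objective: alternative algorithm).

-- ===== PORT A =====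
-- the first 'for i in range(...)' loop: re-lowercases the window slice each step
def pvLoopA (tokens tt : List String) : List Int → Option (List Int)
  | [] => none
  | i :: rest =>
    if (PySem.List.slice tokens (some i) (some (i + tt.length))).map PySem.Str.lower = tt then
      some (PySem.List.pyRange i (i + tt.length) 1)
    else pvLoopA tokens tt rest

-- the fallback 'for i, token in enumerate(tokens)' loop
def pvFallbackA (target_text : String) : List (Int × String) → List Int
  | [] => []
  | (i, token) :: rest =>
    if PySem.Str.isIn (PySem.Str.lower target_text) (PySem.Str.lower token) ||
       PySem.Str.isIn (PySem.Str.lower token) (PySem.Str.lower target_text) then [i]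
    else pvFallbackA target_text rest

def find_token_indices (tokens : List String) (target_text : String) : List Int :=
  let target_tokens := PySem.Str.split₀ (PySem.Str.lower target_text)
  match pvLoopA tokens target_tokens
      (PySem.List.pyRange 0 ((tokens.length : Int) - target_tokens.length + 1) 1) with
  | some r => r
  | none => pvFallbackA target_text (PySem.List.enumerate tokens 0)

-- ===== PORT B =====
-- 'index.setdefault(t, []).append(i)' loop: d[t] = d.get(t, []) + [i]
def pvIndexB (toks : List String) : PySem.Dict String (List Int) :=
  (PySem.List.enumerate toks 0).foldl
    (fun d p => d.modify p.2 [] (· ++ [p.1])) PySem.Dict.empty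

-- 'for i in index.get(target[0], [])' loop with the guarded window check
def pvCandB (toks target : List String) : List Int → Option (List Int)
  | [] => none
  | i :: rest =>
    if (i + (target.length : Int) ≤ (toks.length : Int)) ∧
       PySem.List.slice toks (some i) (some (i + target.length)) = target then
      some (PySem.List.pyRange i (i + target.length) 1)
    else pvCandB toks target rest

def find_token_indices_alt (tokens : List String) (target_text : String) : List Int :=
  let low := PySem.Str.lower target_text
  let target := PySem.Str.split₀ low
  let toks := tokens.map PySem.Str.lower
  if target.length = 0 then []
  else
    match pvCandB toks target ((pvIndexB toks).getD (PySem.List.pyGetD target 0 "") []) with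
    | some r => r
    | none =>
      -- 'next((k for k, tok in enumerate(toks) if low in tok or tok in low), None)'
      match (PySem.List.enumerate toks 0).find?
          (fun p => PySem.Str.isIn low p.2 || PySem.Str.isIn p.2 low) with
      | some p => [p.1]
      | none => []

-- ===== PRECONDITION & SPEC =====
def Spec_find_token_indices (tokens : List String) (target_text : String) (out : List Int) : Prop := out = find_token_indices_alt tokens target_text
instance (tokens : List String) (target_text : String) (out : List Int) : Decidable (Spec_find_token_indices tokens target_text out) := by unfold Spec_find_token_indices; infer_instance

-- ===== CLAIM (what is proved, stated in full; the proofs are below) =====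
def Claim_equal_find_token_indices : Prop := ∀ (tokens : List String) (target_text : String), Dom_find_token_indices tokens target_text → Spec_find_token_indices tokens target_text (find_token_indices tokens target_text)

-- ===== LEMMAS AND PROOFS =====

-- general find? facts not in the library
lemma pvFind?_congr {a : Type} (p q : a → Bool) (l : List a)
    (h : ∀ x ∈ l, p x = q x) : l.find? p = l.find? q := by
  induction l with
  | nil => rfl
  | cons x xs ih =>
      rw [List.find?_cons, List.find?_cons, h x (by simp)]
      cases q x
      · exact ih (fun y hy => h y (by simp [hy]))
      · rfl

lemma pvFind?_filter {a : Type} (p q : a → Bool) (l : List a) :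
    (l.filter q).find? p = l.find? (fun x => q x && p x) := by
  induction l with
  | nil => rfl
  | cons x xs ih =>
      rw [List.filter_cons, List.find?_cons]
      cases hq : q x
      · simpa [hq] using ih
      · rw [if_pos rfl, List.find?_cons]
        cases p x <;> simp [ih]

-- A's first loop = find? of the window test over the index range
lemma loopA_eq_find (tokens tt : List String) (l : List Int) :
    pvLoopA tokens tt l
      = (l.find? (fun i => decide ((PySem.List.slice tokens (some i) (some (i + tt.length))).map PySem.Str.lower = tt))).map
          (fun i => PySem.List.pyRange i (i + tt.length) 1) := by
  induction l with
  | nil => rfl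
  | cons i rest ih =>
      rw [pvLoopA, List.find?_cons]
      by_cases h : (PySem.List.slice tokens (some i) (some (i + tt.length))).map PySem.Str.lower = tt
      · simp [h]
      · rw [if_neg h, decide_eq_false h]
        exact ih

-- B's candidate loop = find? of the guarded window test over the candidate list
lemma candB_eq_find (toks tt : List String) (l : List Int) :
    pvCandB toks tt l
      = (l.find? (fun i => decide ((i + (tt.length : Int) ≤ (toks.length : Int)) ∧ PySem.List.slice toks (some i) (some (i + tt.length)) = tt))).map
          (fun i => PySem.List.pyRange i (i + tt.length) 1) := by
  induction l with
  | nil => rfl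
  | cons i rest ih =>
      rw [pvCandB, List.find?_cons]
      by_cases h : (i + (tt.length : Int) ≤ (toks.length : Int)) ∧ PySem.List.slice toks (some i) (some (i + tt.length)) = tt
      · simp [h]
      · rw [if_neg h, decide_eq_false h]
        exact ih

-- The window test of A (lower a fresh slice) equals the test on the pre-lowered list.
lemma window_eq (tokens tt : List String) (i : Nat) :
    ((PySem.List.slice tokens (some (i : Int)) (some ((i : Int) + tt.length))).map PySem.Str.lower = tt)
      ↔ (PySem.List.slice (tokens.map PySem.Str.lower) (some (i : Int)) (some ((i : Int) + tt.length)) = tt) := by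
  have h : ((i : Int) + (tt.length : Int)) = ((i : Int) + ((tt.length : Nat) : Int)) := by ring
  rw [h, PySem.List.slice_natCast_add, PySem.List.slice_natCast_add,
      ← List.map_drop, ← List.map_take]

-- a matching window forces the window to fit
lemma fit_of_slice_eq (toks tt : List String) (k : Nat) (hk : k < toks.length)
    (h : PySem.List.slice toks (some (k : Int)) (some ((k : Int) + tt.length)) = tt) :
    k + tt.length ≤ toks.length := by
  rw [PySem.List.slice_natCast_add] at h
  have := congrArg List.length h
  simp only [List.length_take, List.length_drop] at this
  omega

-- a matching window starts with the first target token
lemma head_of_slice_eq (toks : List String) (t0 : String) (tt : List String) (k : Nat) (hk : k < toks.length)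
    (h : PySem.List.slice toks (some (k : Int)) (some ((k : Int) + (t0 :: tt).length)) = t0 :: tt) :
    toks[k] = t0 := by
  rw [PySem.List.slice_natCast_add] at h
  have h0 := congrArg (fun l => l[0]?) h
  simp only [List.getElem?_take, List.getElem?_drop] at h0
  simp at h0
  rw [List.getElem?_eq_getElem hk] at h0
  exact Option.some.inj h0

-- the positional index: position lists of each lowered token, in order
lemma index_getD (toks : List String) (c : String) :
    (pvIndexB toks).getD c []
      = ((PySem.List.enumerate toks 0).filter (fun p => p.2 == c)).map (fun p => p.1) := by
  unfold pvIndexB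
  rw [show ((PySem.List.enumerate toks 0).foldl
        (fun d p => d.modify p.2 [] (· ++ [p.1])) PySem.Dict.empty)
      = (((PySem.List.enumerate toks 0).map Prod.swap).foldl
        (fun d p => d.modify p.1 [] (· ++ [p.2])) PySem.Dict.empty) from by
    rw [List.foldl_map]; rfl]
  rw [PySem.Dict.getD_foldl_modify_append, PySem.Dict.getD_empty]
  rw [List.filter_map, List.map_map]
  simp [Function.comp_def]

-- fallback: A's loop over raw tokens = B's find? over the pre-lowered tokens
lemma fallback_eq (target_text : String) (tokens : List String) (s : Int) :
    pvFallbackA target_text (PySem.List.enumerate tokens s)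
      = (match (PySem.List.enumerate (tokens.map PySem.Str.lower) s).find?
            (fun p => PySem.Str.isIn (PySem.Str.lower target_text) p.2 || PySem.Str.isIn p.2 (PySem.Str.lower target_text)) with
         | some p => [p.1]
         | none => []) := by
  induction tokens generalizing s with
  | nil => rfl
  | cons x xs ih =>
      rw [List.map_cons, PySem.List.enumerate_cons, PySem.List.enumerate_cons,
          pvFallbackA, List.find?_cons]
      cases hb : (PySem.Str.isIn (PySem.Str.lower target_text) (PySem.Str.lower x) ||
          PySem.Str.isIn (PySem.Str.lower x) (PySem.Str.lower target_text)) with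
      | true => simp
      | false =>
          simp only [Bool.false_eq_true, if_false]
          exact ih (s + 1)

-- the two first-match searches find the same window (nonempty target)
lemma search_eq (tokens : List String) (t0 : String) (tt : List String) :
    pvLoopA tokens (t0 :: tt)
        (PySem.List.pyRange 0 ((tokens.length : Int) - (t0 :: tt).length + 1) 1)
      = pvCandB (tokens.map PySem.Str.lower) (t0 :: tt)
          ((pvIndexB (tokens.map PySem.Str.lower)).getD t0 []) := by
  rw [loopA_eq_find, candB_eq_find, index_getD]
  rw [List.find?_map, pvFind?_filter]
  -- notation
  have hB :
      (PySem.List.enumerate (tokens.map PySem.Str.lower) 0).find?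
          (fun p => (p.2 == t0) &&
            decide ((p.1 + ((t0 :: tt).length : Int) ≤ ((tokens.map PySem.Str.lower).length : Int)) ∧
              PySem.List.slice (tokens.map PySem.Str.lower) (some p.1) (some (p.1 + (t0 :: tt).length)) = t0 :: tt))
        = (PySem.List.enumerate (tokens.map PySem.Str.lower) 0).find?
          (fun p => decide (PySem.List.slice (tokens.map PySem.Str.lower) (some p.1) (some (p.1 + (t0 :: tt).length)) = t0 :: tt)) := by
    apply pvFind?_congr
    intro p hp
    rcases (PySem.List.mem_enumerate_iff _ _ p).1 hp with ⟨k, hk, rfl⟩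
    simp only [zero_add]
    by_cases hs : PySem.List.slice (tokens.map PySem.Str.lower) (some (k : Int))
        (some ((k : Int) + (t0 :: tt).length)) = t0 :: tt
    · have hfit := fit_of_slice_eq (tokens.map PySem.Str.lower) (t0 :: tt) k hk hs
      have hhd := head_of_slice_eq (tokens.map PySem.Str.lower) t0 tt k hk hs
      have hle : ((k : Int) + ((tt.length : Int) + 1) ≤ (tokens.length : Int)) := by
        simp only [List.length_map, List.length_cons] at hfit
        omega
      simp only [List.length_cons, Nat.cast_add, Nat.cast_one] at hs ⊢
      simp [hs, hhd, hle]
    · simp only [List.length_cons, Nat.cast_add, Nat.cast_one] at hs ⊢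
      simp [hs]
  simp only [Function.comp_def]
  rw [hB]
  have hC := List.find?_map
    (p := fun i : Int => decide (PySem.List.slice (tokens.map PySem.Str.lower) (some i) (some (i + (t0 :: tt).length)) = t0 :: tt))
    (f := fun p : Int × String => p.1)
    (l := PySem.List.enumerate (tokens.map PySem.Str.lower) 0)
  simp only [Function.comp_def] at hC
  rw [← hC, PySem.List.map_fst_enumerate]
  simp only [zero_add, List.length_map]
  have hA : (PySem.List.pyRange 0 ((tokens.length : Int) - ((t0 :: tt).length : Int) + 1)).find?
        (fun i => decide (List.map PySem.Str.lower (PySem.List.slice tokens (some i) (some (i + (t0 :: tt).length))) = t0 :: tt))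
      = (PySem.List.pyRange 0 ((tokens.length : Int) - ((t0 :: tt).length : Int) + 1)).find?
        (fun i => decide (PySem.List.slice (tokens.map PySem.Str.lower) (some i) (some (i + (t0 :: tt).length)) = t0 :: tt)) := by
    apply pvFind?_congr
    intro i hi
    rcases PySem.List.mem_pyRange_one.1 hi with ⟨h0, h1⟩
    obtain ⟨k, rfl⟩ : ∃ k : Nat, i = (k : Int) := ⟨i.toNat, (Int.toNat_of_nonneg h0).symm⟩
    exact decide_eq_decide.mpr (window_eq tokens (t0 :: tt) k)
  rw [hA]
  by_cases hmn : (t0 :: tt).length ≤ tokens.length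
  · rw [show PySem.List.pyRange 0 (tokens.length : Int)
        = PySem.List.pyRange 0 ((tokens.length : Int) - ((t0 :: tt).length : Int) + 1)
          ++ PySem.List.pyRange ((tokens.length : Int) - ((t0 :: tt).length : Int) + 1) (tokens.length : Int) from
      PySem.List.pyRange_one_append _ _ _
        (by simp only [List.length_cons] at hmn ⊢; push_cast; omega)
        (by simp only [List.length_cons]; push_cast; omega)]
    rw [List.find?_append]
    rw [show (PySem.List.pyRange ((tokens.length : Int) - ((t0 :: tt).length : Int) + 1) (tokens.length : Int)).find?
          (fun i => decide (PySem.List.slice (tokens.map PySem.Str.lower) (some i) (some (i + (t0 :: tt).length)) = t0 :: tt))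
        = none from by
      rw [List.find?_eq_none]
      intro i hi
      rcases PySem.List.mem_pyRange_one.1 hi with ⟨h0, h1⟩
      have h0' : (0 : Int) ≤ i := by simp only [List.length_cons] at h0 hmn; push_cast at h0; omega
      obtain ⟨k, rfl⟩ : ∃ k : Nat, i = (k : Int) := ⟨i.toNat, (Int.toNat_of_nonneg h0').symm⟩
      simp only [decide_eq_true_eq]
      intro heq
      have hlen := congrArg List.length heq
      rw [PySem.List.slice_natCast_add] at hlen
      simp only [List.length_take, List.length_drop, List.length_map, List.length_cons] at hlen
      simp only [List.length_cons] at h0 h1 hmn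
      push_cast at h0 h1
      omega]
    rw [Option.or_none]
  · rw [PySem.List.pyRange_one_eq_nil
      (show (tokens.length : Int) - ((t0 :: tt).length : Int) + 1 ≤ 0 from by
        simp only [List.length_cons] at hmn ⊢; push_cast; omega)]
    rw [show (PySem.List.pyRange 0 (tokens.length : Int)).find?
          (fun i => decide (PySem.List.slice (tokens.map PySem.Str.lower) (some i) (some (i + (t0 :: tt).length)) = t0 :: tt))
        = none from by
      rw [List.find?_eq_none]
      intro i hi
      rcases PySem.List.mem_pyRange_one.1 hi with ⟨h0, h1⟩
      obtain ⟨k, rfl⟩ : ∃ k : Nat, i = (k : Int) := ⟨i.toNat, (Int.toNat_of_nonneg h0).symm⟩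
      simp only [decide_eq_true_eq]
      intro heq
      have hlen := congrArg List.length heq
      rw [PySem.List.slice_natCast_add] at hlen
      simp only [List.length_take, List.length_drop, List.length_map, List.length_cons] at hlen
      simp only [List.length_cons] at h1 hmn
      omega]
    rfl

-- ===== VERDICT (by name: the statement is the Claim_ definition above) =====
theorem find_token_indices_spec : Claim_equal_find_token_indices := by
  intro tokens target_text _
  unfold Spec_find_token_indices
  simp only [find_token_indices, find_token_indices_alt]
  cases htt : PySem.Str.split₀ (PySem.Str.lower target_text) with
  | nil =>
      -- empty target: A matches the empty window at i = 0 and returns []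
      rw [PySem.List.pyRange_one_cons (by simp only [List.length_nil]; push_cast; omega)]
      rw [pvLoopA]
      rw [if_pos (by simp [PySem.List.slice, PySem.List.clampIdx])]
      simp [PySem.List.pyRange]
  | cons t0 rest =>
      rw [search_eq tokens t0 rest]
      simp only [List.length_cons, if_neg (by omega : ¬ (rest.length + 1 = 0))]
      rw [PySem.List.pyGetD_zero_cons]
      cases pvCandB (tokens.map PySem.Str.lower) (t0 :: rest)
          ((pvIndexB (tokens.map PySem.Str.lower)).getD t0 []) with
      | some r => rfl
      | none => exact fallback_eq target_text tokens 0
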